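-- pv_equiv track=rewrite | github.com/wladerer/VaspTools | vasprun.py | merge_discontinuities
-- ===== SOURCE A (Python) =====
-- def merge_discontinuities(labels: list[str]) -> list[str]:
--     '''Merges discontinuities in a list of labels'''
--     labels = [label for i, label in enumerate(
--         labels[:-1]) if label != labels[i+1]] + [labels[-1]]
--
--     # if the label n starts with the same substring the same as the label n+1, then the label n+1 is a discontinuity
--     # and should be merged with the label n using the character '|' (e.g 'S_0|S_2')
--     # dont keep the label n+1
--     merged_labels = []
--
--     for i, label in enumerate(labels):
--         # short circuit evaluation
--         if (i != len(labels) - 1) and label[0] == labels[i+1][0]: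
--             merged_labels.append(label + '|' + labels[i+1])
--             # remove the label n+1
--             labels.pop(i+1)
--         else:
--             merged_labels.append(label)
--
--     return merged_labels
-- ===== SOURCE B (Python) =====
-- def merge_discontinuities(labels: list[str]) -> list[str]:
--     '''Merges discontinuities in a list of labels'''
--     # collapse consecutive duplicates in one pass
--     dedup = []
--     for x in labels:
--         if not dedup or dedup[-1] != x:
--             dedup.append(x)
--     # single greedy pass: merge a first-char-matching neighbour pair, then skip it
--     merged = []
--     j = 0
--     n = len(dedup)
--     while j < n:
--         if j + 1 < n and dedup[j][0] == dedup[j + 1][0]: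
--             merged.append(dedup[j] + '|' + dedup[j + 1])
--             j += 2
--         else:
--             merged.append(dedup[j])
--             j += 1
--     return merged
-- ===== Notes on version B (the rewrite author's own statement) =====
-- stated objective: faster
-- what changed: A rebuilds the list with an index comprehension and then merges pairs by popping from the list it is iterating over (each pop is a linear shift); B does a one-pass fold for the consecutive dedup and a single two-pointer greedy pass (j += 2 over merged pairs) with no mutation of the scanned list.
-- outside the precondition, e.g. on merge_discontinuities(['', '']): A returns [''], B returns ['']
import Mathlib
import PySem

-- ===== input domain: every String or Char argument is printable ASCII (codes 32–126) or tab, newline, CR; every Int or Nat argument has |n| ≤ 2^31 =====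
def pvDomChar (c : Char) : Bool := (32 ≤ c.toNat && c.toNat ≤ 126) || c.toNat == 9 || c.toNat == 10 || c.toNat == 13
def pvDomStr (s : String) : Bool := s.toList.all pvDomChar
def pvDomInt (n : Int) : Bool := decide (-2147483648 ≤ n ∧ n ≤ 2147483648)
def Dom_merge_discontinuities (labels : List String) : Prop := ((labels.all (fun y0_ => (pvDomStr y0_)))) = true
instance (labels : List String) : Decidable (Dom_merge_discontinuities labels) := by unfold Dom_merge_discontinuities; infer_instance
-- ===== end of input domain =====

-- B replaces A's quadratic pop-inside-loop merge by a single two-pointer pass (and the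
-- index comprehension dedup by a one-pass fold); equivalence is proved on nonempty lists
-- of nonempty strings (elsewhere the Pythons raise, except corners noted at Pre_).

-- ===== PORT A =====

-- termination helper for loopA (popping can only shrink the list)
theorem pv_poplen_le (l : List String) (i : Int) :
    (((PySem.List.pop? l i).map Prod.snd).getD l).length ≤ l.length := by
  cases h : PySem.List.pop? l i with
  | none => simp
  | some r =>
    have := PySem.List.length_of_pop?_eq_some l h
    simp; omega

-- the for-loop of A: i walks the LIVE list, which pop shrinks; label[0] is ported as
-- PySem.Str.pyGet? (none = IndexError, excluded by Pre_); labels[i+1] is in range in the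
-- branch that reads it, ported with pyGetD
def loopA (l : List String) (i : Nat) (acc : List String) : List String :=
  if h : i < l.length then
    let label := l[i]
    if i ≠ l.length - 1 ∧
        PySem.Str.pyGet? label 0 = PySem.Str.pyGet? (PySem.List.pyGetD l ((i : Int) + 1) "") 0 then
      loopA (((PySem.List.pop? l ((i : Int) + 1)).map Prod.snd).getD l) (i + 1)
        (acc ++ [label ++ "|" ++ PySem.List.pyGetD l ((i : Int) + 1) ""])
    else
      loopA l (i + 1) (acc ++ [label])
  else acc
termination_by l.length - i
decreasing_by
  · have := pv_poplen_le l ((i : Int) + 1); omega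
  · omega

-- labels[:-1] comprehension with enumerate, then + [labels[-1]] (in range under Pre_)
def merge_discontinuities (labels : List String) : List String :=
  let labels' :=
    ((PySem.List.enumerate (PySem.List.slice labels none (some (-1))) 0).filter
        (fun p => p.2 != PySem.List.pyGetD labels (p.1 + 1) "")).map (·.2)
      ++ [PySem.List.pyGetD labels (-1) ""]
  loopA labels' 0 []

-- ===== PORT B =====

-- one-pass consecutive dedup: append x unless it equals the last kept element
def dedupB (labels : List String) : List String :=
  labels.foldl
    (fun d x => if d.isEmpty || (PySem.List.pyGet? d (-1) != some x) then d ++ [x] else d) []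

-- single greedy pass: merge a first-char-matching neighbour pair, then skip it (j += 2)
def loopB (d : List String) (j : Nat) (out : List String) : List String :=
  if h : j < d.length then
    if j + 1 < d.length ∧
        PySem.Str.pyGet? d[j] 0 = PySem.Str.pyGet? (PySem.List.pyGetD d ((j : Int) + 1) "") 0 then
      loopB d (j + 2) (out ++ [d[j] ++ "|" ++ PySem.List.pyGetD d ((j : Int) + 1) ""])
    else
      loopB d (j + 1) (out ++ [d[j]])
  else out
termination_by d.length - j

def merge_discontinuities_alt (labels : List String) : List String :=
  loopB (dedupB labels) 0 []

-- ===== PRECONDITION & SPEC =====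
-- Pre_ excludes the empty list (A raises IndexError on labels[-1]) and lists containing
-- an empty string: on most of those A raises IndexError on label[0], and on the few where
-- the empty strings are never indexed A and B return the same value anyway (see cites).
def Pre_merge_discontinuities (labels : List String) : Prop :=
  labels ≠ [] ∧ ∀ s ∈ labels, s ≠ ""
instance (labels : List String) : Decidable (Pre_merge_discontinuities labels) := by
  unfold Pre_merge_discontinuities; infer_instance

def pvWitness_merge_discontinuities : List String := ["S_0", "S_0", "S_2", "G"]

def Spec_merge_discontinuities (labels : List String) (out : List String) : Prop :=
  out = merge_discontinuities_alt labels
instance (labels : List String) (out : List String) : Decidable (Spec_merge_discontinuities labels out) := by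
  unfold Spec_merge_discontinuities; infer_instance

-- ===== CLAIM (what is proved, stated in full; the proofs are below) =====
def Claim_equal_merge_discontinuities : Prop :=
  ∀ (labels : List String), Dom_merge_discontinuities labels →
    Pre_merge_discontinuities labels →
    Spec_merge_discontinuities labels (merge_discontinuities labels)

-- ===== LEMMAS AND PROOFS =====

-- canonical consecutive dedup (proof-side reference shape)
def cded : List String → List String
  | [] => []
  | [a] => [a]
  | a :: b :: t => if a = b then cded (b :: t) else a :: cded (b :: t)

-- canonical greedy merge walk (proof-side reference shape)
def walk : List String → List String
  | [] => []
  | [a] => [a]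
  | a :: b :: t =>
    if PySem.Str.pyGet? a 0 = PySem.Str.pyGet? b 0 then (a ++ "|" ++ b) :: walk t
    else a :: walk (b :: t)

theorem getD_idx (d : List String) (j : Nat) (h : j + 1 < d.length) :
    PySem.List.pyGetD d ((j:Int)+1) "" = d[j+1] := by
  rw [show ((j:Int)+1) = ((j+1:Nat):Int) by push_cast; ring, PySem.List.pyGetD_natCast]
  exact List.getD_eq_getElem d "" h

theorem drop_two (d : List String) (j : Nat) (h : j < d.length) (h2 : j+1 < d.length) :
    d.drop j = d[j] :: d[j+1] :: d.drop (j+2) := by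
  rw [List.drop_eq_getElem_cons h, List.drop_eq_getElem_cons h2]

theorem loopB_eq (d : List String) (j : Nat) (out : List String) :
    loopB d j out = out ++ walk (d.drop j) := by
  induction j, out using loopB.induct d with
  | case1 j out h hc ih =>
    have hget := getD_idx d j hc.1
    rw [loopB, dif_pos h, if_pos hc, ih, hget, drop_two d j h hc.1, walk,
      if_pos (hget ▸ hc.2)]
    simp
  | case2 j out h hc ih =>
    rw [loopB, dif_pos h, if_neg hc, ih, List.drop_eq_getElem_cons h]
    by_cases h2 : j + 1 < d.length
    · have hget := getD_idx d j h2
      have hne : ¬ (PySem.Str.pyGet? d[j] 0 = PySem.Str.pyGet? d[j+1] 0) := by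
        intro he; exact hc ⟨h2, by rw [hget]; exact he⟩
      rw [List.drop_eq_getElem_cons h2, walk, if_neg hne, ← List.drop_eq_getElem_cons h2]
      simp
    · have hd : d.drop (j+1) = [] := List.drop_eq_nil_of_le (by omega)
      rw [hd]
      simp [walk]
  | case3 j out h =>
    rw [loopB, dif_neg h, List.drop_eq_nil_of_le (by omega)]
    simp [walk]

theorem loopA_eq (l : List String) (i : Nat) (acc : List String) :
    loopA l i acc = acc ++ walk (l.drop i) := by
  induction l, i, acc using loopA.induct with
  | case1 l i acc h label hc ih =>
    have h2 : i + 1 < l.length := by omega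
    have hget := getD_idx l i h2
    have hpop : PySem.List.pop? l ((i:Int)+1) = some (l[i+1], l.eraseIdx (i+1)) := by
      rw [show ((i:Int)+1) = ((i+1:Nat):Int) by push_cast; ring]
      exact PySem.List.pop?_natCast l (i+1) h2
    have herase : (l.eraseIdx (i+1)).drop (i+1) = l.drop (i+2) := by
      have hlt : (l.take (i+1)).length = i + 1 := List.length_take_of_le (by omega)
      simp [List.eraseIdx_eq_take_drop_succ, hlt]
    rw [loopA, dif_pos h, if_pos hc, ih, hpop]
    simp only [Option.map_some, Option.getD_some, herase]
    rw [hget, drop_two l i h h2, walk, if_pos (hget ▸ hc.2)]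
    simp
    rfl
  | case2 l i acc h label hc ih =>
    rw [loopA, dif_pos h, if_neg hc, ih, List.drop_eq_getElem_cons h]
    by_cases h2 : i + 1 < l.length
    · have hget := getD_idx l i h2
      have hne : ¬ (PySem.Str.pyGet? l[i] 0 = PySem.Str.pyGet? l[i+1] 0) := by
        intro he; exact hc ⟨by omega, by rw [hget]; exact he⟩
      rw [List.drop_eq_getElem_cons h2, walk, if_neg hne, ← List.drop_eq_getElem_cons h2]
      simp
      rfl
    · have hd : l.drop (i+1) = [] := List.drop_eq_nil_of_le (by omega)
      rw [hd]
      simp [walk]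
      rfl
  | case3 l i acc h =>
    rw [loopA, dif_neg h, List.drop_eq_nil_of_le (by omega)]
    simp [walk]

-- the filtered enumerate comprehension of A, with an arbitrary start index
def GA (labels : List String) (s : Int) (u : List String) : List String :=
  ((PySem.List.enumerate u s).filter
      (fun p => p.2 != PySem.List.pyGetD labels (p.1 + 1) "")).map (·.2)

theorem GA_nil (labels : List String) (s : Int) : GA labels s [] = [] := by
  simp [GA, PySem.List.enumerate_nil]

theorem GA_cons (labels : List String) (s : Int) (x : String) (u : List String) :
    GA labels s (x :: u)
      = (if x = PySem.List.pyGetD labels (s + 1) "" then [] else [x]) ++ GA labels (s + 1) u := by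
  simp only [GA, PySem.List.enumerate_cons, List.filter_cons]
  by_cases hx : x = PySem.List.pyGetD labels (s + 1) ""
  · simp [hx]
  · simp [hx]

theorem GA_key : ∀ (t pre : List String) (a : String),
    GA (pre ++ a :: t) (pre.length) ((a :: t).dropLast)
        ++ [PySem.List.pyGetD (pre ++ a :: t) (-1) ""]
      = cded (a :: t) := by
  intro t
  induction t with
  | nil =>
    intro pre a
    simp [GA_nil, PySem.List.pyGetD_neg_one_append_singleton, cded]
  | cons b t' ih =>
    intro pre a
    have hsplit : pre ++ a :: b :: t' = (pre ++ [a]) ++ b :: t' := by simp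
    have hgetb : PySem.List.pyGetD (pre ++ a :: b :: t') ((pre.length : Int) + 1) "" = b := by
      rw [show ((pre.length : Int) + 1) = ((pre.length + 1 : Nat) : Int) by push_cast; ring,
        PySem.List.pyGetD_natCast, List.getD_eq_getElem?_getD,
        List.getElem?_append_right (by omega)]
      simp
    have hlen : ((pre.length : Int) + 1) = (((pre ++ [a]).length : Nat) : Int) := by
      simp
    rw [List.dropLast_cons₂, GA_cons, hgetb, hlen, hsplit, List.append_assoc,
      ih (pre ++ [a]) b]
    by_cases hab : a = b
    · rw [if_pos hab, cded, if_pos hab]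
      simp
    · rw [if_neg hab, cded, if_neg hab]
      simp

theorem dedupA_eq (a : String) (t : List String) :
    ((PySem.List.enumerate ((a :: t).dropLast) 0).filter
        (fun p => p.2 != PySem.List.pyGetD (a :: t) (p.1 + 1) "")).map (·.2)
      ++ [PySem.List.pyGetD (a :: t) (-1) ""] = cded (a :: t) := by
  have := GA_key t [] a
  simpa [GA] using this

theorem foldB (t : List String) : ∀ (acc : List String) (a : String),
    t.foldl (fun d x => if d.isEmpty || (PySem.List.pyGet? d (-1) != some x) then d ++ [x] else d) (acc ++ [a])
      = acc ++ cded (a :: t) := by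
  induction t with
  | nil => intro acc a; simp [cded]
  | cons b t' ih =>
    intro acc a
    rw [List.foldl_cons]
    by_cases hab : a = b
    · have hcond : ((acc ++ [a]).isEmpty || (PySem.List.pyGet? (acc ++ [a]) (-1) != some b)) = false := by
        simp [PySem.List.pyGet?_neg_one_append_singleton, hab]
      simp only [hcond, Bool.false_eq_true, if_false]
      rw [ih acc a, cded, if_pos hab, hab]
    · have hcond : ((acc ++ [a]).isEmpty || (PySem.List.pyGet? (acc ++ [a]) (-1) != some b)) = true := by
        simp [PySem.List.pyGet?_neg_one_append_singleton, hab]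
      simp only [hcond, if_true]
      rw [ih (acc ++ [a]) b, cded, if_neg hab]
      simp

theorem dedupB_eq (labels : List String) : dedupB labels = cded labels := by
  cases labels with
  | nil => rfl
  | cons a t =>
    unfold dedupB
    rw [List.foldl_cons,
      show (if ([] : List String).isEmpty || (PySem.List.pyGet? ([] : List String) (-1) != some a)
          then ([] : List String) ++ [a] else []) = [] ++ [a] by simp]
    exact foldB t [] a

-- ===== VERDICT (by name: the statement is the Claim_ definition above) =====
theorem merge_discontinuities_spec : Claim_equal_merge_discontinuities := by
  intro labels _ hpre
  unfold Spec_merge_discontinuities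
  obtain ⟨hne, _⟩ := hpre
  cases labels with
  | nil => exact absurd rfl hne
  | cons a t =>
    unfold merge_discontinuities merge_discontinuities_alt
    rw [dedupB_eq, loopA_eq, loopB_eq]
    simp [PySem.List.slice_to_neg_one]
    rw [show ((PySem.List.enumerate (a :: t).dropLast 0).filter
        (fun p => p.2 != PySem.List.pyGetD (a :: t) (p.1 + 1) "")).map (·.2)
        ++ [PySem.List.pyGetD (a :: t) (-1) ""] = cded (a :: t) from dedupA_eq a t]
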